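-- pv_equiv track=rewrite | github.com/Steboss/your_first_mlops_stack | chapter_1_apache_beam/webscraper/prototype.py | remove_duplicates_and_corresponding_elements
-- ===== SOURCE A (Python) =====
-- def remove_duplicates_and_corresponding_elements(list1, list2):
--     # Find duplicates and their first occurrences
--     seen = {}
--     duplicates_indexes = set()
--     for index, item in enumerate(list1):
--         if item in seen:
--             duplicates_indexes.add(seen[item])  # Add the first occurrence of the duplicate
--             duplicates_indexes.add(index)       # Add the current index
--         else:
--             seen[item] = index  # Store the first occurrence of this item
--
--     # If no duplicates, return lists as they are
--     if not duplicates_indexes: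
--         return list1, list2
--
--     # Remove duplicates from list1 using indexes to keep
--     new_list1 = [item for idx, item in enumerate(list1) if idx not in duplicates_indexes]
--
--     # Remove corresponding elements from list2 using the same indexes
--     new_list2 = [item for idx, item in enumerate(list2) if idx not in duplicates_indexes]
--
--     return new_list1, new_list2
-- ===== SOURCE B (Python) =====
-- def remove_duplicates_and_corresponding_elements(list1, list2):
--     # One frequency pass; keep exactly the elements occurring once, and the
--     # aligned list2 entries (entries beyond len(list1) are always kept).
--     counts = {}
--     for x in list1:
--         counts[x] = counts.get(x, 0) + 1
--     new_list1 = [x for x in list1 if counts[x] == 1]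
--     new_list2 = [y for idx, y in enumerate(list2)
--                  if idx >= len(list1) or counts[list1[idx]] == 1]
--     return new_list1, new_list2
-- ===== Notes on version B (the rewrite author's own statement) =====
-- stated objective: simpler
-- what changed: B replaces A's first-occurrence dict + duplicate-index set + index-membership filters by a single frequency count, filtering list1 by count==1 directly and list2 by the count of its aligned list1 element, with no index set and no early-return branch.
import Mathlib
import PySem

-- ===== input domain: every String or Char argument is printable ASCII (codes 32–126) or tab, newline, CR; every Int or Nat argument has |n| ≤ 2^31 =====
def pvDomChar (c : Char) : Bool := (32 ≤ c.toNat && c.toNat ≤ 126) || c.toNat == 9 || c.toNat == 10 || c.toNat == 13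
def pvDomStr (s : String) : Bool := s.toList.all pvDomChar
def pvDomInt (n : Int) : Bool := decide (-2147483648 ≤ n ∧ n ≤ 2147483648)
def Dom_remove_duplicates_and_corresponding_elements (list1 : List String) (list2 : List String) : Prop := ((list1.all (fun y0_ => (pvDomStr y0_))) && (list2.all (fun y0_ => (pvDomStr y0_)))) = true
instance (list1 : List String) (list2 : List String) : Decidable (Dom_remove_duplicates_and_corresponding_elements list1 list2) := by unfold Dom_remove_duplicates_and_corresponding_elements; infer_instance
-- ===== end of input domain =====

-- B replaces A's index-set machinery (first-occurrence dict + duplicate-index set + two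
-- index-membership filters) by a single frequency count and count-based filters: simpler.

-- ===== PORT A =====
-- loop body of A's first `for index, item in enumerate(list1)` loop
def pvStepA (st : PySem.Dict String Int × PySem.Set Int) (p : Int × String) :
    PySem.Dict String Int × PySem.Set Int :=
  match st.1.get? p.2 with                      -- `if item in seen:` (and the `seen[item]` lookup)
  | some j => (st.1, (st.2.add j).add p.1)      -- add first occurrence and current index
  | none   => (st.1.insert p.2 p.1, st.2)       -- `seen[item] = index`

def remove_duplicates_and_corresponding_elements (list1 : List String) (list2 : List String) : List String × List String :=
  let st := (PySem.List.enumerate list1).foldl pvStepA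
              ((PySem.Dict.empty, PySem.Set.empty) : PySem.Dict String Int × PySem.Set Int)
  if PySem.Set.len st.2 = 0 then (list1, list2)          -- `if not duplicates_indexes`
  else
    ((PySem.List.enumerate list1).filterMap
        (fun p => if st.2.contains p.1 then none else some p.2),
     (PySem.List.enumerate list2).filterMap
        (fun p => if st.2.contains p.1 then none else some p.2))

-- ===== PORT B =====
def remove_duplicates_and_corresponding_elements_alt (list1 : List String) (list2 : List String) : List String × List String :=
  let counts := list1.foldl (fun (d : PySem.Dict String Int) x => d.insert x (d.getD x 0 + 1)) PySem.Dict.empty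
  (list1.filter (fun x => counts.getD x 0 == 1),           -- counts[x]: x ∈ list1, so getD is exact
   (PySem.List.enumerate list2).filterMap (fun p =>
     -- `idx >= len(list1) or counts[list1[idx]] == 1`; the pyGetD is only reached with p.1 < len(list1)
     if (list1.length : Int) ≤ p.1 || counts.getD (PySem.List.pyGetD list1 p.1 "") 0 == 1
     then some p.2 else none))

-- ===== PRECONDITION & SPEC =====
def Spec_remove_duplicates_and_corresponding_elements (list1 : List String) (list2 : List String) (out : List String × List String) : Prop := out = remove_duplicates_and_corresponding_elements_alt list1 list2
instance (list1 : List String) (list2 : List String) (out : List String × List String) : Decidable (Spec_remove_duplicates_and_corresponding_elements list1 list2 out) := by unfold Spec_remove_duplicates_and_corresponding_elements; infer_instance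

-- ===== CLAIM (what is proved, stated in full; the proofs are below) =====
def Claim_equal_remove_duplicates_and_corresponding_elements : Prop := ∀ (list1 : List String) (list2 : List String), Dom_remove_duplicates_and_corresponding_elements list1 list2 → Spec_remove_duplicates_and_corresponding_elements list1 list2 (remove_duplicates_and_corresponding_elements list1 list2)

-- ===== LEMMAS AND PROOFS =====

-- two distinct positions holding the same value force count ≥ 2
lemma pv_two_le_count {l : List String} {x : String} {j k : Nat}
    (hj : l[j]? = some x) (hk : l[k]? = some x) (hne : j ≠ k) : 2 ≤ l.count x := by
  rcases List.getElem?_eq_some_iff.1 hj with ⟨hjl, hj'⟩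
  rcases List.getElem?_eq_some_iff.1 hk with ⟨hkl, hk'⟩
  rw [← List.duplicate_iff_two_le_count]
  rcases Nat.lt_or_gt_of_ne hne with h | h
  · exact List.duplicate_iff_exists_distinct_get.2
      ⟨⟨j, hjl⟩, ⟨k, hkl⟩, by simpa using h, by simp [hj'], by simp [hk']⟩
  · exact List.duplicate_iff_exists_distinct_get.2
      ⟨⟨k, hkl⟩, ⟨j, hjl⟩, by simpa using h, by simp [hk'], by simp [hj']⟩

-- characterisation of A's first loop: `seen` maps each element of l to its first index,
-- and `duplicates_indexes` holds exactly the indices of values occurring at least twice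
lemma pvFoldA_spec (l : List String) :
    (∀ x, ((PySem.List.enumerate l).foldl pvStepA
        ((PySem.Dict.empty, PySem.Set.empty) : PySem.Dict String Int × PySem.Set Int)).1.get? x
        = if x ∈ l then some (l.idxOf x : Int) else none)
  ∧ (∀ i : Int, i ∈ ((PySem.List.enumerate l).foldl pvStepA
        ((PySem.Dict.empty, PySem.Set.empty) : PySem.Dict String Int × PySem.Set Int)).2
        ↔ ∃ (k : Nat) (v : String), l[k]? = some v ∧ i = (k : Int) ∧ 2 ≤ l.count v) := by
  induction l using List.reverseRecOn with
  | nil => simp [PySem.List.enumerate, PySem.Dict.get?_empty, PySem.Set.empty]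
  | append_singleton l' x ih =>
    obtain ⟨ih1, ih2⟩ := ih
    rw [PySem.List.enumerate_append] at *
    simp only [PySem.List.enumerate_cons, PySem.List.enumerate_nil, List.foldl_append,
      List.foldl_cons, List.foldl_nil] at *
    set S := (PySem.List.enumerate l').foldl pvStepA
        ((PySem.Dict.empty, PySem.Set.empty) : PySem.Dict String Int × PySem.Set Int) with hS
    by_cases hx : x ∈ l'
    · have hget : S.1.get? x = some (l'.idxOf x : Int) := by rw [ih1]; simp [hx]
      have hstep : pvStepA S (0 + (l'.length : Int), x)
          = (S.1, (S.2.add (l'.idxOf x : Int)).add (0 + (l'.length : Int))) := by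
        unfold pvStepA; rw [hget]
      rw [hstep]
      constructor
      · intro y
        rw [ih1 y]
        by_cases hy : y ∈ l'
        · simp [hy, List.mem_append, List.idxOf_append_of_mem hy]
        · have : y ∉ l' ++ [x] := by
            simp only [List.mem_append, List.mem_singleton]
            rintro (h | rfl) <;> [exact hy h; exact hy hx]
          simp [hy, this]
      · intro i
        rw [PySem.Set.mem_add, PySem.Set.mem_add, ih2 i]
        constructor
        · rintro ((⟨k, v, hk, rfl, hc⟩ | rfl) | rfl)
          · exact ⟨k, v, by rw [List.getElem?_append_left (List.getElem?_eq_some_iff.1 hk).1]; exact hk,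
              rfl, by rw [List.count_append]; omega⟩
          · refine ⟨l'.idxOf x, x, ?_, rfl, ?_⟩
            · rw [List.getElem?_append_left (List.idxOf_lt_length_of_mem hx)]
              exact List.getElem?_idxOf hx
            · have h1 : 1 ≤ l'.count x := List.count_pos_iff.2 hx
              rw [List.count_append]; simp; omega
          · refine ⟨l'.length, x, by simp, by omega, ?_⟩
            have h1 : 1 ≤ l'.count x := List.count_pos_iff.2 hx
            rw [List.count_append]; simp; omega
        · rintro ⟨k, v, hk, rfl, hc⟩
          rcases Nat.lt_trichotomy k l'.length with hkl | hkl | hkl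
          · have hk' : l'[k]? = some v := by
              rw [List.getElem?_append_left hkl] at hk; exact hk
            by_cases hvx : v = x
            · subst hvx
              by_cases h2 : 2 ≤ l'.count v
              · exact Or.inl (Or.inl ⟨k, v, hk', rfl, h2⟩)
              · -- exactly one occurrence of x in l': k must be the first one
                have h1 : 1 ≤ l'.count v := List.count_pos_iff.2 hx
                have hidx : l'[l'.idxOf v]? = some v := List.getElem?_idxOf hx
                have : k = l'.idxOf v := by
                  by_contra hne
                  exact h2 (pv_two_le_count hk' hidx hne)
                exact Or.inl (Or.inr (by rw [this]))
            · have : (l' ++ [x]).count v = l'.count v := by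
                rw [List.count_append]; simp [Ne.symm hvx]
              exact Or.inl (Or.inl ⟨k, v, hk', rfl, by omega⟩)
          · subst hkl
            have : v = x := by simp at hk; exact hk.symm
            exact Or.inr (by omega)
          · exfalso
            have := (List.getElem?_eq_some_iff.1 hk).1
            simp at this; omega
    · have hget : S.1.get? x = none := by rw [ih1]; simp [hx]
      have hstep : pvStepA S (0 + (l'.length : Int), x)
          = (S.1.insert x (0 + (l'.length : Int)), S.2) := by
        unfold pvStepA; rw [hget]
      rw [hstep]
      constructor
      · intro y
        rw [PySem.Dict.get?_insert, ih1 y]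
        by_cases hy : y = x
        · rw [hy]
          have hidx : (l' ++ [x]).idxOf x = l'.length := by
            rw [List.idxOf_append_of_notMem hx]; simp
          simp [hx, hidx]
        · by_cases hyl : y ∈ l'
          · simp [hy, hyl, List.mem_append, List.idxOf_append_of_mem hyl]
          · have : y ∉ l' ++ [x] := by
              simp only [List.mem_append, List.mem_singleton]
              rintro (h | h) <;> [exact hyl h; exact hy h]
            simp [hy, hyl, this]
      · intro i
        rw [ih2 i]
        constructor
        · rintro ⟨k, v, hk, rfl, hc⟩
          exact ⟨k, v, by rw [List.getElem?_append_left (List.getElem?_eq_some_iff.1 hk).1]; exact hk,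
            rfl, by rw [List.count_append]; omega⟩
        · rintro ⟨k, v, hk, rfl, hc⟩
          rcases Nat.lt_trichotomy k l'.length with hkl | hkl | hkl
          · have hk' : l'[k]? = some v := by
              rw [List.getElem?_append_left hkl] at hk; exact hk
            have hvx : v ≠ x := by
              rintro rfl; exact hx (List.mem_of_getElem? hk')
            have : (l' ++ [x]).count v = l'.count v := by
              rw [List.count_append]; simp [Ne.symm hvx]
            exact ⟨k, v, hk', rfl, by omega⟩
          · exfalso; subst hkl
            have hv : v = x := by simp at hk; exact hk.symm
            have hz : l'.count x = 0 := List.count_eq_zero.2 hx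
            have : (l' ++ [x]).count v = 1 := by
              rw [hv, List.count_append, hz]; simp
            omega
          · exfalso
            have := (List.getElem?_eq_some_iff.1 hk).1
            simp at this; omega

-- an index-driven removal filter over enumerate collapses to a value filter
lemma pv_fm_enum_eq_filter {α : Type} (l : List α) (s : Int) (P : Int → Bool) (Q : α → Bool)
    (h : ∀ (k : Nat) (v : α), l[k]? = some v → P (s + k) = Q v) :
    (PySem.List.enumerate l s).filterMap (fun p => if P p.1 then none else some p.2)
      = l.filter (fun v => !(Q v)) := by
  induction l generalizing s with
  | nil => simp [PySem.List.enumerate]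
  | cons a t ih =>
    rw [PySem.List.enumerate_cons, List.filterMap_cons, List.filter_cons]
    have h0 : P s = Q a := by have := h 0 a (by simp); simpa using this
    have ht : ∀ (k : Nat) (v : α), t[k]? = some v → P ((s + 1) + k) = Q v := by
      intro k v hk
      have := h (k + 1) v (by simpa using hk)
      rw [← this]; congr 1; push_cast; ring
    rw [ih (s + 1) ht]
    cases hq : Q a <;> simp [h0, hq]

theorem remove_duplicates_and_corresponding_elements_spec_aux (list1 list2 : List String) :
    remove_duplicates_and_corresponding_elements list1 list2
      = remove_duplicates_and_corresponding_elements_alt list1 list2 := by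
  obtain ⟨h1, h2⟩ := pvFoldA_spec list1
  unfold remove_duplicates_and_corresponding_elements remove_duplicates_and_corresponding_elements_alt
  simp only []
  set S := (PySem.List.enumerate list1).foldl pvStepA
      ((PySem.Dict.empty, PySem.Set.empty) : PySem.Dict String Int × PySem.Set Int) with hS
  have hcounts : ∀ x, (list1.foldl (fun (d : PySem.Dict String Int) x => d.insert x (d.getD x 0 + 1))
      PySem.Dict.empty).getD x 0 = (list1.count x : Int) := by
    intro x
    rw [PySem.Dict.getD_foldl_insert_add_one, PySem.Dict.getD_empty, zero_add]
  have hcontains : ∀ (k : Nat) (v : String), list1[k]? = some v →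
      S.2.contains ((0 : Int) + k) = decide (2 ≤ list1.count v) := by
    intro k v hk
    by_cases hm : ((0 : Int) + k) ∈ S.2
    · rw [(PySem.Set.contains_iff _ _).2 hm]
      rcases (h2 _).1 hm with ⟨k', v', hk', hkk, hc⟩
      have : k' = k := by omega
      subst this
      rw [hk] at hk'
      have : v' = v := (Option.some_inj.1 hk').symm
      subst this
      simp [hc]
    · have hcf : S.2.contains ((0 : Int) + k) = false := by
        cases hcb : S.2.contains ((0 : Int) + k)
        · rfl
        · exact absurd ((PySem.Set.contains_iff _ _).1 hcb) hm
      rw [hcf]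
      have : ¬ 2 ≤ list1.count v := fun hc => hm ((h2 _).2 ⟨k, v, hk, by omega, hc⟩)
      simp [this]
  by_cases h0 : PySem.Set.len S.2 = 0
  · -- no duplicates: A returns the lists unchanged; B's filters keep everything
    rw [if_pos h0]
    have hnil : S.2 = [] := by
      simp only [PySem.Set.len] at h0
      exact List.length_eq_zero_iff.1 (by exact_mod_cast h0)
    have hone : ∀ v ∈ list1, list1.count v = 1 := by
      intro v hv
      obtain ⟨k, hk⟩ := List.getElem?_of_mem hv
      have hnot : ¬ 2 ≤ list1.count v := by
        intro hc
        have : ((0 : Int) + k) ∈ S.2 := (h2 _).2 ⟨k, v, hk, by omega, hc⟩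
        rw [hnil] at this; simp at this
      have := List.count_pos_iff.2 hv
      omega
    refine Prod.ext ?_ ?_
    · show list1 = _
      symm
      rw [List.filter_eq_self]
      intro a ha
      rw [hcounts a]
      have := hone a ha
      simp [this]
    · show list2 = _
      symm
      rw [List.filterMap_congr (g := fun p : Int × String => some p.2) ?_]
      · rw [show (fun p : Int × String => some p.2) = some ∘ Prod.snd from rfl,
          List.filterMap_eq_map]
        exact PySem.List.map_snd_enumerate list2 0
      · intro p hp
        rcases (PySem.List.mem_enumerate_iff _ _ _).1 hp with ⟨k, hkl, rfl⟩
        by_cases hk1 : k < list1.length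
        · have hget : list1[k]? = some list1[k] := List.getElem?_eq_some_iff.2 ⟨hk1, rfl⟩
          have hopt : list1[k]?.getD "" = list1[k] := by rw [hget]; rfl
          have hc1 : list1.count list1[k] = 1 :=
            hone _ (List.getElem_mem hk1)
          simp [PySem.List.pyGetD_natCast, hopt, hcounts, hc1]
        · have hle : (list1.length : Int) ≤ (k : Int) := by omega
          simp [hle]
  · rw [if_neg h0]
    refine Prod.ext ?_ ?_
    · show (PySem.List.enumerate list1).filterMap _ = list1.filter _
      rw [pv_fm_enum_eq_filter list1 0 S.2.contains (fun v => decide (2 ≤ list1.count v)) hcontains]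
      apply List.filter_congr
      intro x hx
      rw [hcounts x]
      have := List.count_pos_iff.2 hx
      by_cases h2c : 2 ≤ list1.count x
      · have hne : list1.count x ≠ 1 := by omega
        simp [h2c, hne]
      · have he : list1.count x = 1 := by omega
        simp [he]
    · show (PySem.List.enumerate list2).filterMap _ = (PySem.List.enumerate list2).filterMap _
      apply List.filterMap_congr
      intro p hp
      rcases (PySem.List.mem_enumerate_iff _ _ _).1 hp with ⟨k, hkl, rfl⟩
      simp only [zero_add]
      by_cases hk1 : k < list1.length
      · have hget : list1[k]? = some list1[k] := List.getElem?_eq_some_iff.2 ⟨hk1, rfl⟩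
        have hopt : list1[k]?.getD "" = list1[k] := by rw [hget]; rfl
        have hpos := List.count_pos_iff.2 (List.getElem_mem hk1)
        have hlt : ¬ ((list1.length : Int) ≤ (k : Int)) := by omega
        by_cases h2c : 2 ≤ list1.count list1[k]
        · have hm : ((k : Int)) ∈ S.2 := (h2 _).2 ⟨k, list1[k], hget, rfl, h2c⟩
          have hne : list1.count list1[k] ≠ 1 := by omega
          simp [hm, hne, hlt, PySem.List.pyGetD_natCast, hopt, hcounts]
        · have hm : ((k : Int)) ∉ S.2 := by
            intro hm
            rcases (h2 _).1 hm with ⟨k', v', hk', hkk, hc'⟩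
            have hkeq : k' = k := by omega
            rw [hkeq, hget] at hk'
            have hv : v' = list1[k] := Option.some_inj.1 hk'.symm
            rw [hv] at hc'
            exact h2c hc'
          have he : list1.count list1[k] = 1 := by omega
          simp [hm, he, hlt, PySem.List.pyGetD_natCast, hopt, hcounts]
      · have hnotmem : ((k : Int)) ∉ S.2 := by
          intro hm
          rcases (h2 _).1 hm with ⟨k', v', hk', hkk, _⟩
          have : k' = k := by omega
          subst this
          have := (List.getElem?_eq_some_iff.1 hk').1
          omega
        have hle : (list1.length : Int) ≤ (k : Int) := by omega
        simp [hnotmem, hle]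

-- ===== VERDICT (by name: the statement is the Claim_ definition above) =====
theorem remove_duplicates_and_corresponding_elements_spec : Claim_equal_remove_duplicates_and_corresponding_elements := by
  intro list1 list2 _
  exact remove_duplicates_and_corresponding_elements_spec_aux list1 list2
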